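-- pv_equiv track=rewrite | github.com/ParthGaneriwala/lica_text2svg_baseline | scripts/svg_constraints.py | _since_last_element_attrs
-- ===== SOURCE A (Python) =====
-- from typing import List, Dict, Set
--
-- def _structural(tok: str) -> bool:
--     return tok.startswith("<")
--
-- def _since_last_element_attrs(seq: List[str]) -> Set[str]:
--     # Return a set of "attr hints" since the most recent structural element
--     attrs: Set[str] = set()
--     i = len(seq) - 1
--     # Find last structural (tag) index
--     while i >= 0 and not _structural(seq[i]):
--         i -= 1
--     j = i + 1
--     while j < len(seq) and not _structural(seq[j]):
--         if seq[j].startswith("d:"):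
--             attrs.add("d:")
--         elif "=" in seq[j]:
--             k = seq[j].split("=",1)[0]
--             attrs.add(k)
--         j += 1
--     return attrs
-- ===== SOURCE B (Python) =====
-- from typing import List, Set
--
-- def _since_last_element_attrs(seq: List[str]) -> Set[str]:
--     # Single forward pass: reset at every structural token, otherwise
--     # accumulate the attr hint for the token.
--     attrs: Set[str] = set()
--     for tok in seq:
--         if tok.startswith("<"):
--             attrs = set()
--         elif tok.startswith("d:"):
--             attrs.add("d:")
--         elif "=" in tok:
--             attrs.add(tok.split("=", 1)[0])
--     return attrs
-- ===== Notes on version B (the rewrite author's own statement) =====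
-- stated objective: simpler
-- what changed: replaces the backward search for the last structural token plus a second forward collect loop with a single forward pass that resets the accumulated set at each structural token
import Mathlib
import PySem

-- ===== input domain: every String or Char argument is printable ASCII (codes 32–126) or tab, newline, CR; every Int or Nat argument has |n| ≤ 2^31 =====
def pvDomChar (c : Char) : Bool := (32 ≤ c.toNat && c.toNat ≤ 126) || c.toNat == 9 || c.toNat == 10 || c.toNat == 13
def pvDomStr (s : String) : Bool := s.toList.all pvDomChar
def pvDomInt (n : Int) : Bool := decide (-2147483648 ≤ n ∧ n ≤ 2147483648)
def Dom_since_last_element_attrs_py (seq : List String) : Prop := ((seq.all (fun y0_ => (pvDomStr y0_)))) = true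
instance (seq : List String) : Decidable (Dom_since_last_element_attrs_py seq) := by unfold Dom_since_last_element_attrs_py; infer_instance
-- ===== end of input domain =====

-- ===== PORT A =====
-- B replaces A's backward boundary search + forward collect with one reset-on-tag forward pass (objective: simpler).
-- helper: tok.startswith("<")
def pvStructural (tok : String) : Bool := PySem.Str.startswith tok "<"

-- A's per-token `if` chain inside the second while loop
def pvHint (attrs : PySem.Set String) (tok : String) : PySem.Set String :=
  if PySem.Str.startswith tok "d:" then PySem.Set.add attrs "d:"
  else if PySem.Str.isIn "=" tok then
    PySem.Set.add attrs (((PySem.Str.splitMax? tok "=" 1).getD []).getD 0 "")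
  else attrs

-- A's first while loop: i = len(seq)-1; while i >= 0 and not structural(seq[i]): i -= 1.
-- fuel n means the current i is n-1 (fuel 0 ↔ i = -1); returns the final i.
def pvBack (seq : List String) : Nat → Int
  | 0 => -1
  | n + 1 => if pvStructural (((PySem.List.pyGet? seq (n : Int))).getD "") then (n : Int) else pvBack seq n

-- A's second while loop, running over the suffix seq[j:]: stops at a structural token.
def pvFwd (attrs : PySem.Set String) : List String → PySem.Set String
  | [] => attrs
  | t :: ts => if pvStructural t then attrs else pvFwd (pvHint attrs t) ts

def since_last_element_attrs_py (seq : List String) : List String :=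
  pvFwd PySem.Set.empty (seq.drop (pvBack seq seq.length + 1).toNat)

-- ===== PORT B =====
-- one fold over seq: `attrs = set()` on a structural token, otherwise B's own if/elif chain
def since_last_element_attrs_py_alt (seq : List String) : List String :=
  seq.foldl
    (fun attrs tok =>
      if PySem.Str.startswith tok "<" then PySem.Set.empty
      else if PySem.Str.startswith tok "d:" then PySem.Set.add attrs "d:"
      else if PySem.Str.isIn "=" tok then
        PySem.Set.add attrs (((PySem.Str.splitMax? tok "=" 1).getD []).getD 0 "")
      else attrs)
    PySem.Set.empty

-- ===== PRECONDITION & SPEC =====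
def Spec_since_last_element_attrs_py (seq : List String) (out : List String) : Prop := out = since_last_element_attrs_py_alt seq
instance (seq : List String) (out : List String) : Decidable (Spec_since_last_element_attrs_py seq out) := by unfold Spec_since_last_element_attrs_py; infer_instance

-- ===== CLAIM (what is proved, stated in full; the proofs are below) =====
def Claim_equal_since_last_element_attrs_py : Prop := ∀ (seq : List String), Dom_since_last_element_attrs_py seq → Spec_since_last_element_attrs_py seq (since_last_element_attrs_py seq)

-- ===== LEMMAS AND PROOFS =====

-- B's fold step is A's pvStructural/pvHint classification (definitional)
theorem alt_unfold (seq : List String) :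
    since_last_element_attrs_py_alt seq =
      seq.foldl (fun attrs tok => if pvStructural tok then PySem.Set.empty else pvHint attrs tok)
        PySem.Set.empty := rfl

-- pvBack stays below its fuel and above -1
theorem pvBack_range (seq : List String) (n : Nat) : -1 ≤ pvBack seq n ∧ pvBack seq n < (n : Int) := by
  induction n with
  | zero => simp [pvBack]
  | succ m ih =>
    simp only [pvBack]
    split
    · constructor <;> omega
    · exact ⟨ih.1, by have := ih.2; push_cast; omega⟩

-- pvBack only looks at indices < n, so appending past n does not change it
theorem pvBack_append (ys : List String) (x : String) (n : Nat) (hn : n ≤ ys.length) :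
    pvBack (ys ++ [x]) n = pvBack ys n := by
  induction n with
  | zero => rfl
  | succ m ih =>
    have hm : m < ys.length := by omega
    simp only [pvBack, PySem.List.pyGet?_natCast, List.getElem?_append_left hm, ih (by omega)]

-- every index strictly between pvBack seq n and n is non-structural
theorem pvBack_no_struct (seq : List String) (n : Nat) (hn : n ≤ seq.length)
    (j : Nat) (h1 : pvBack seq n < (j : Int)) (h2 : j < n) :
    pvStructural (seq[j]?.getD "") = false := by
  induction n with
  | zero => omega
  | succ m ih =>
    rw [pvBack] at h1
    rw [PySem.List.pyGet?_natCast] at h1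
    by_cases hs : pvStructural (seq[m]?.getD "") = true
    · rw [if_pos hs] at h1; omega
    · rw [if_neg hs] at h1
      rcases Nat.lt_or_ge j m with hj | hj
      · exact ih (by omega) h1 hj
      · have : j = m := by omega
        subst this
        simpa using hs

-- pvFwd over a structural-free prefix processes it fully
theorem pvFwd_append_no_struct (l m : List String) (attrs : PySem.Set String)
    (h : ∀ t ∈ l, pvStructural t = false) :
    pvFwd attrs (l ++ m) = pvFwd (l.foldl pvHint attrs) m := by
  induction l generalizing attrs with
  | nil => rfl
  | cons t ts ih =>
    have ht : pvStructural t = false := h t (by simp)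
    simp only [List.cons_append, pvFwd, ht, Bool.false_eq_true, if_false, List.foldl_cons]
    exact ih _ (fun u hu => h u (by simp [hu]))

theorem pvFwd_no_struct (l : List String) (attrs : PySem.Set String)
    (h : ∀ t ∈ l, pvStructural t = false) :
    pvFwd attrs l = l.foldl pvHint attrs := by
  have := pvFwd_append_no_struct l [] attrs h
  simpa [pvFwd] using this

-- main equality, by reverse induction on seq
theorem pv_main (seq : List String) :
    since_last_element_attrs_py seq = since_last_element_attrs_py_alt seq := by
  induction seq using List.reverseRecOn with
  | nil => rfl
  | append_singleton ys x ih =>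
    have hlen : (ys ++ [x]).length = ys.length + 1 := by simp
    rw [alt_unfold] at ih ⊢
    unfold since_last_element_attrs_py
    rw [hlen, List.foldl_append]
    have hget : (ys ++ [x])[ys.length]?.getD "" = x := by simp
    by_cases hs : pvStructural x = true
    · -- last token structural: A drops everything, B resets to empty
      have hb : pvBack (ys ++ [x]) (ys.length + 1) = (ys.length : Int) := by
        rw [pvBack, PySem.List.pyGet?_natCast, hget, if_pos hs]
      rw [hb]
      have h1 : ((ys.length : Int) + 1).toNat = ys.length + 1 := by omega
      rw [h1]
      have h2 : (ys ++ [x]).drop (ys.length + 1) = [] :=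
        List.drop_eq_nil_of_le (by simp)
      rw [h2]
      simp [pvFwd, hs]
    · -- last token not structural: both sides apply pvHint to the previous result
      have hb : pvBack (ys ++ [x]) (ys.length + 1) = pvBack ys ys.length := by
        rw [pvBack, PySem.List.pyGet?_natCast, hget, if_neg hs]
        exact pvBack_append ys x ys.length (le_refl _)
      rw [hb]
      have hrange := pvBack_range ys ys.length
      set i := pvBack ys ys.length with hi
      have hk : (i + 1).toNat ≤ ys.length := by omega
      have hdrop : (ys ++ [x]).drop (i + 1).toNat = ys.drop (i + 1).toNat ++ [x] :=
        List.drop_append_of_le_length hk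
      rw [hdrop]
      have hnos : ∀ t ∈ ys.drop (i + 1).toNat, pvStructural t = false := by
        intro t ht
        obtain ⟨m, hm, rfl⟩ := List.getElem_of_mem ht
        rw [List.getElem_drop]
        have hj2 : (i + 1).toNat + m < ys.length := by
          have hlen2 : (ys.drop (i + 1).toNat).length = ys.length - (i + 1).toNat := by simp
          omega
        have hj1 : i < (((i + 1).toNat + m : Nat) : Int) := by push_cast; omega
        have := pvBack_no_struct ys ys.length (le_refl _) ((i + 1).toNat + m) (hi ▸ hj1) hj2
        rwa [List.getElem?_eq_getElem hj2, Option.getD_some] at this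
      rw [pvFwd_append_no_struct _ _ _ hnos]
      rw [pvFwd, if_neg hs]
      rw [← pvFwd_no_struct _ _ hnos]
      unfold since_last_element_attrs_py at ih
      rw [← hi] at ih
      rw [ih]
      simp [pvFwd, hs]

-- ===== VERDICT (by name: the statement is the Claim_ definition above) =====
theorem since_last_element_attrs_py_spec : Claim_equal_since_last_element_attrs_py := by
  intro seq _
  unfold Spec_since_last_element_attrs_py
  exact pv_main seq
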